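-- pv_equiv track=rewrite | github.com/ftiv-lab/FTIV | windows/text_window.py | _remap_task_states
-- ===== SOURCE A (Python) =====
-- from difflib import SequenceMatcher
-- from typing import Any, Dict, List, Optional
--
-- def _remap_task_states(old_lines: List[str], new_lines: List[str], old_states: List[bool]) -> List[bool]:
--     matcher = SequenceMatcher(a=old_lines, b=new_lines, autojunk=False)
--     remapped: List[bool] = []
--     for tag, i1, i2, j1, j2 in matcher.get_opcodes():
--         if tag == "equal":
--             remapped.extend(old_states[i1:i2])
--         elif tag == "replace":
--             old_chunk = old_states[i1:i2]
--             new_count = j2 - j1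
--             carry = min(len(old_chunk), new_count)
--             remapped.extend(old_chunk[:carry])
--             if new_count > carry:
--                 remapped.extend([False] * (new_count - carry))
--         elif tag == "insert":
--             remapped.extend([False] * (j2 - j1))
--         elif tag == "delete":
--             continue
--     return remapped
-- ===== SOURCE B (Python) =====
-- from typing import List, Optional
--
--
-- def _best_block(a: List[str], b: List[str], alo: int, ahi: int, blo: int, bhi: int):
--     """Longest common contiguous run of a[alo:ahi] vs b[blo:bhi] by the textbook
--     dynamic-programming table (run[t] = run length ending at (i, blo+t)), first
--     maximum in (i, t) scan order — the same block difflib picks with no junk."""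
--     width = bhi - blo
--     run = [0] * width
--     bi, bj, bk = alo, blo, 0
--     for i in range(alo, ahi):
--         prev, run = run, [0] * width
--         for t in range(width):
--             if a[i] == b[blo + t]:
--                 run[t] = prev[t - 1] + 1 if t > 0 else 1
--         for t in range(width):
--             if run[t] > bk:
--                 bk = run[t]
--                 bi, bj = i + 1 - bk, blo + t + 1 - bk
--     return bi, bj, bk
--
--
-- def _remap_task_states(old_lines: List[str], new_lines: List[str], old_states: List[bool]) -> List[bool]:
--     limit = len(old_states)
--     src: List[Optional[int]] = []   # per output slot: source old index, or None = fresh False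
--     prev_i = prev_j = 0
--
--     def gap_to(i: int, j: int) -> None:
--         nonlocal prev_i, prev_j
--         gap = j - prev_j
--         carry = min(max(min(i, limit) - prev_i, 0), gap)   # old states surviving into the gap
--         src.extend(range(prev_i, prev_i + carry))
--         src.extend([None] * (gap - carry))
--
--     def walk(alo: int, ahi: int, blo: int, bhi: int) -> None:
--         nonlocal prev_i, prev_j
--         i, j, k = _best_block(old_lines, new_lines, alo, ahi, blo, bhi)
--         if k == 0:
--             return
--         walk(alo, i, blo, j)
--         gap_to(i, j)
--         src.extend(range(i, min(i + k, limit)))            # the matched run itself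
--         prev_i, prev_j = i + k, j + k
--         walk(i + k, ahi, j + k, bhi)
--
--     walk(0, len(old_lines), 0, len(new_lines))
--     gap_to(len(old_lines), len(new_lines))
--     return [False if s is None else old_states[s] for s in src]
-- ===== Notes on version B (the rewrite author's own statement) =====
-- stated objective: alternative
-- what changed: B drops difflib and its opcode tag dispatch entirely: it finds each longest matching run with a textbook dynamic-programming table (run lengths ending at each pair, first maximum in scan order) instead of difflib's hash-bucket j2len dictionary with extension loops, and remaps states in two stages - first an index map saying, per output slot, which old index its state comes from (None = fresh False) built with one uniform gap-carry rule, then a single materializing pass - where A extends booleans directly under a four-way equal/replace/insert/delete dispatch over get_opcodes().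
import Mathlib
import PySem

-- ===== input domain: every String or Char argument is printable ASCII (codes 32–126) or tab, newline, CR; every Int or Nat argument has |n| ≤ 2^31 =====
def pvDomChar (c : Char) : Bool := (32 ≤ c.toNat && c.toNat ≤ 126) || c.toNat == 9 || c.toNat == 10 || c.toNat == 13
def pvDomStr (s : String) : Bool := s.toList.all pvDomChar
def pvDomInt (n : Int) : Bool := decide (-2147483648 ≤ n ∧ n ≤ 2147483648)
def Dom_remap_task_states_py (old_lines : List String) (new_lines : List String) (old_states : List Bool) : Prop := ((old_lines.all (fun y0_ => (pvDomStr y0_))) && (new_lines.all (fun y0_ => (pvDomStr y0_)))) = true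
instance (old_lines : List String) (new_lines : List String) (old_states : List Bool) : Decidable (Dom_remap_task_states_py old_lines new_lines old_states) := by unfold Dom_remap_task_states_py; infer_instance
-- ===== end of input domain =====

-- B replaces A's difflib opcode dispatch by its own textbook DP-table longest-run
-- matcher and a two-stage remap: an index map (output slot -> source old index or
-- None), then one materializing pass (objective: alternative algorithm, same cost).
-- The helpers below port difflib.SequenceMatcher (autojunk=False, no junk) for
-- List String, which Python A calls as a library.

-- difflib b2j.get(a[i]) restricted to [blo, bhi): indices j of b with b[j] = x, increasing
def pvJs (b : List String) (x : String) (blo bhi : Nat) : List Nat :=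
  (List.range b.length).filter (fun j => blo ≤ j && j < bhi && b.getD j "" == x)

-- the j2len dictionary pass of difflib.find_longest_match (j2len as an assoc list)
def pvFLMdict (a b : List String) (alo ahi blo bhi : Nat) : Nat × Nat × Nat :=
  ((List.range' alo (ahi - alo)).foldl
    (fun (st : (Nat × Nat × Nat) × List (Nat × Nat)) i =>
      let j2len := st.2
      (pvJs b (a.getD i "") blo bhi).foldl
        (fun (p : (Nat × Nat × Nat) × List (Nat × Nat)) j =>
          -- k = j2len.get(j-1, 0) + 1 ; Python's j-1 = -1 is never a key, hence the j = 0 guard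
          let k := (if j = 0 then 0 else (List.lookup (j - 1) j2len).getD 0) + 1
          ((if k > p.1.2.2 then (i + 1 - k, j + 1 - k, k) else p.1), p.2 ++ [(j, k)]))
        (st.1, ([] : List (Nat × Nat))))
    ((alo, blo, 0), ([] : List (Nat × Nat)))).1

-- leftward extension loop of find_longest_match (isbjunk is constantly false here)
def pvExtL (a b : List String) (alo blo : Nat) (besti bestj bestsize : Nat) : Nat × Nat × Nat :=
  if h : alo < besti ∧ blo < bestj ∧ a.getD (besti - 1) "" = b.getD (bestj - 1) "" then
    pvExtL a b alo blo (besti - 1) (bestj - 1) (bestsize + 1)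
  else (besti, bestj, bestsize)
termination_by besti
decreasing_by omega

-- rightward extension loop of find_longest_match
def pvExtR (a b : List String) (ahi bhi besti bestj bestsize : Nat) : Nat :=
  if h : besti + bestsize < ahi ∧ bestj + bestsize < bhi ∧
         a.getD (besti + bestsize) "" = b.getD (bestj + bestsize) "" then
    pvExtR a b ahi bhi besti bestj (bestsize + 1)
  else bestsize
termination_by ahi - bestsize
decreasing_by omega

-- find_longest_match; the two junk-adjacent loops are identically no-ops with no junk
def pvFLM (a b : List String) (alo ahi blo bhi : Nat) : Nat × Nat × Nat :=
  let d := pvFLMdict a b alo ahi blo bhi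
  let e := pvExtL a b alo blo d.1 d.2.1 d.2.2
  (e.1, e.2.1, pvExtR a b ahi bhi e.1 e.2.1 e.2.2)

-- get_matching_blocks' divide-and-conquer (difflib's LIFO queue + sort = this in-order recursion)
def pvMBrec (a b : List String) : Nat → Nat → Nat → Nat → Nat → List (Nat × Nat × Nat)
  | 0, _, _, _, _ => []
  | fuel + 1, alo, ahi, blo, bhi =>
    let r := pvFLM a b alo ahi blo bhi
    if r.2.2 = 0 then []
    else pvMBrec a b fuel alo r.1 blo r.2.1 ++
         (r.1, r.2.1, r.2.2) :: pvMBrec a b fuel (r.1 + r.2.2) ahi (r.2.1 + r.2.2) bhi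

-- merge adjacent blocks and append the (la, lb, 0) sentinel, as in get_matching_blocks
def pvBlocks (a b : List String) : List (Nat × Nat × Nat) :=
  let mb := pvMBrec a b (a.length + b.length + 1) 0 a.length 0 b.length
  let st := mb.foldl
    (fun (st : List (Nat × Nat × Nat) × Nat × Nat × Nat) blk =>
      if st.2.1 + st.2.2.2 = blk.1 ∧ st.2.2.1 + st.2.2.2 = blk.2.1 then
        (st.1, st.2.1, st.2.2.1, st.2.2.2 + blk.2.2)
      else ((if st.2.2.2 ≠ 0 then st.1 ++ [st.2] else st.1), blk))
    ([], 0, 0, 0)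
  (if st.2.2.2 ≠ 0 then st.1 ++ [st.2] else st.1) ++ [(a.length, b.length, 0)]

-- ===== PORT A =====
-- one step of get_opcodes' loop over the matching blocks
def pvOpStep (st : List (String × Nat × Nat × Nat × Nat) × Nat × Nat) (blk : Nat × Nat × Nat) :
    List (String × Nat × Nat × Nat × Nat) × Nat × Nat :=
  let i := st.2.1; let j := st.2.2
  let ai := blk.1; let bj := blk.2.1; let n := blk.2.2
  let tag : String := if i < ai ∧ j < bj then "replace"
    else if i < ai then "delete" else if j < bj then "insert" else ""
  let ans := if tag ≠ "" then st.1 ++ [(tag, i, ai, j, bj)] else st.1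
  ((if n ≠ 0 then ans ++ [("equal", ai, ai + n, bj, bj + n)] else ans), ai + n, bj + n)

def pvOpcodes (a b : List String) : List (String × Nat × Nat × Nat × Nat) :=
  ((pvBlocks a b).foldl pvOpStep ([], 0, 0)).1

-- the body of A's for-loop over opcodes
def pvAStep (old_states : List Bool) (acc : List Bool) (op : String × Nat × Nat × Nat × Nat) :
    List Bool :=
  if op.1 = "equal" then acc ++ (old_states.drop op.2.1).take (op.2.2.1 - op.2.1)
  else if op.1 = "replace" then
    let chunk := (old_states.drop op.2.1).take (op.2.2.1 - op.2.1)
    let nc := op.2.2.2.2 - op.2.2.2.1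
    let carry := min chunk.length nc
    acc ++ chunk.take carry ++ (if nc > carry then List.replicate (nc - carry) false else [])
  else if op.1 = "insert" then acc ++ List.replicate (op.2.2.2.2 - op.2.2.2.1) false
  else acc

def remap_task_states_py (old_lines : List String) (new_lines : List String) (old_states : List Bool) : List Bool :=
  (pvOpcodes old_lines new_lines).foldl (pvAStep old_states) []

-- ===== PORT B =====
-- _best_block: the textbook DP table over the region; run[t] = run length ending at
-- (i, blo+t); the final subtractions i+1-k, blo+t+1-k never underflow since k is a run
-- length ending at (i, blo+t) inside the region, so Nat subtraction is Python's
def pvRowB (a b : List String) (i blo width : Nat) (prev : List Nat) : List Nat :=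
  (List.range width).map fun t =>
    if a.getD i "" = b.getD (blo + t) "" then (if 0 < t then prev.getD (t - 1) 0 + 1 else 1)
    else 0

def pvScanB (i blo : Nat) (run : List Nat) (best : Nat × Nat × Nat) : Nat × Nat × Nat :=
  (List.range run.length).foldl
    (fun bst t =>
      if run.getD t 0 > bst.2.2 then
        (i + 1 - run.getD t 0, blo + t + 1 - run.getD t 0, run.getD t 0)
      else bst)
    best

def pvBestB (a b : List String) (alo ahi blo bhi : Nat) : Nat × Nat × Nat :=
  let width := bhi - blo
  ((List.range' alo (ahi - alo)).foldl
    (fun (st : List Nat × Nat × Nat × Nat) i =>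
      let run := pvRowB a b i blo width st.1
      (run, pvScanB i blo run st.2))
    (List.replicate width 0, alo, blo, 0)).2

-- gap_to: the uniform gap rule (Python's max(..,0)/min pair is Nat truncated subtraction)
def pvGapTo (limit : Nat) (st : List (Option Nat) × Nat × Nat) (i j : Nat) : List (Option Nat) :=
  let gap := j - st.2.2
  let carry := min (min i limit - st.2.1) gap
  st.1 ++ (List.range' st.2.1 carry).map some ++ List.replicate (gap - carry) none

-- walk: Source B's recursion; the fuel argument only realizes termination (the recursion
-- depth is bounded by half the region perimeter, so the fuel below never runs out)
def pvWalk (a b : List String) (limit : Nat) :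
    Nat → List (Option Nat) × Nat × Nat → Nat → Nat → Nat → Nat → List (Option Nat) × Nat × Nat
  | 0, st, _, _, _, _ => st
  | fuel + 1, st, alo, ahi, blo, bhi =>
    let r := pvBestB a b alo ahi blo bhi
    if r.2.2 = 0 then st
    else
      let st1 := pvWalk a b limit fuel st alo r.1 blo r.2.1
      let st2 := (pvGapTo limit st1 r.1 r.2.1 ++
            (List.range' r.1 (min (r.1 + r.2.2) limit - r.1)).map some,
          r.1 + r.2.2, r.2.1 + r.2.2)
      pvWalk a b limit fuel st2 (r.1 + r.2.2) ahi (r.2.1 + r.2.2) bhi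

-- stage-2 lookup: every some-index in the map is < old_states.length by construction,
-- so getD is exactly Python's old_states[s]
def pvMat (old_states : List Bool) (s : Option Nat) : Bool :=
  match s with
  | none => false
  | some i => old_states.getD i false

def remap_task_states_py_alt (old_lines : List String) (new_lines : List String) (old_states : List Bool) : List Bool :=
  (pvGapTo old_states.length
      (pvWalk old_lines new_lines old_states.length
        (old_lines.length + new_lines.length + 1) ([], 0, 0)
        0 old_lines.length 0 new_lines.length)
      old_lines.length new_lines.length).map (pvMat old_states)

-- ===== PRECONDITION & SPEC =====
def Spec_remap_task_states_py (old_lines : List String) (new_lines : List String) (old_states : List Bool) (out : List Bool) : Prop := out = remap_task_states_py_alt old_lines new_lines old_states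
instance (old_lines : List String) (new_lines : List String) (old_states : List Bool) (out : List Bool) : Decidable (Spec_remap_task_states_py old_lines new_lines old_states out) := by unfold Spec_remap_task_states_py; infer_instance

-- ===== CLAIM (what is proved, stated in full; the proofs are below) =====
def Claim_equal_remap_task_states_py : Prop := ∀ (old_lines : List String) (new_lines : List String) (old_states : List Bool), Dom_remap_task_states_py old_lines new_lines old_states → Spec_remap_task_states_py old_lines new_lines old_states (remap_task_states_py old_lines new_lines old_states)

-- ===== LEMMAS AND PROOFS =====

-- run length of the common run ending at (i, j), cut off below alo/blo
def pvE (a b : List String) (alo blo : Nat) : Nat → Nat → Nat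
  | i, j =>
    if a.getD i "" = b.getD j "" then
      (if h : alo < i ∧ blo < j then pvE a b alo blo (i - 1) (j - 1) else 0) + 1
    else 0
termination_by i j => i
decreasing_by omega

-- the strict-improvement best-update rule shared by both matchers
def pvUpd (st : Nat × Nat × Nat) (t : Nat × Nat × Nat) : Nat × Nat × Nat :=
  if t.2.2 > st.2.2 then (t.1 + 1 - t.2.2, t.2.1 + 1 - t.2.2, t.2.2) else st

def pvPairs (a b : List String) (alo blo bhi i : Nat) : List (Nat × Nat × Nat) :=
  (List.range' blo (bhi - blo)).map (fun j => (i, j, pvE a b alo blo i j))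

def pvAll (a b : List String) (alo ahi blo bhi : Nat) : List (Nat × Nat × Nat) :=
  (List.range' alo (ahi - alo)).flatMap (pvPairs a b alo blo bhi)

-- the reference scan: fold the update rule over every pair of the region in order
def pvRef (a b : List String) (alo ahi blo bhi : Nat) : Nat × Nat × Nat :=
  (pvAll a b alo ahi blo bhi).foldl pvUpd (alo, blo, 0)

lemma pvE_no_match (a b : List String) (alo blo i j : Nat)
    (h : ¬ a.getD i "" = b.getD j "") : pvE a b alo blo i j = 0 := by
  rw [pvE, if_neg h]

lemma pvE_le (a b : List String) (alo blo : Nat) : ∀ i j, alo ≤ i → blo ≤ j →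
    pvE a b alo blo i j ≤ min (i + 1 - alo) (j + 1 - blo) := by
  intro i
  induction i using Nat.strong_induction_on with
  | _ i ih =>
    intro j hi hj
    rw [pvE]
    split_ifs with hm hb
    · have := ih (i - 1) (by omega) (j - 1) (by omega) (by omega)
      omega
    · omega
    · omega

-- pvE really is maximal: its run cannot be extended one more step to the left
lemma pvE_stop (a b : List String) (alo blo : Nat) : ∀ k i j,
    pvE a b alo blo i j = k → alo ≤ i - k → blo ≤ j - k → k ≤ i → k ≤ j →
    a.getD (i - k) "" = b.getD (j - k) "" → False := by
  intro k
  induction k with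
  | zero =>
    intro i j h0 _ _ _ _ hm
    simp only [Nat.sub_zero] at hm
    rw [pvE, if_pos hm] at h0
    omega
  | succ k ih =>
    intro i j hE hia hjb hki hkj hm
    rw [pvE] at hE
    by_cases hmm : a.getD i "" = b.getD j ""
    · rw [if_pos hmm] at hE
      split_ifs at hE with hb
      · have hE' : pvE a b alo blo (i - 1) (j - 1) = k := by omega
        exact ih (i - 1) (j - 1) hE' (by omega) (by omega) (by omega) (by omega)
          (by
            have e1 : i - 1 - k = i - (k + 1) := by omega
            have e2 : j - 1 - k = j - (k + 1) := by omega
            rw [e1, e2]; exact hm)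
      · omega
    · rw [if_neg hmm] at hE
      omega

lemma pvUpd_mono : ∀ (L : List (Nat × Nat × Nat)) (st : Nat × Nat × Nat),
    st.2.2 ≤ (L.foldl pvUpd st).2.2 := by
  intro L
  induction L with
  | nil => intro st; simp
  | cons x tl ih =>
    intro st
    have := ih (pvUpd st x)
    simp only [List.foldl_cons]
    have hx : st.2.2 ≤ (pvUpd st x).2.2 := by
      unfold pvUpd; split_ifs with h
      · simp only; omega
      · exact le_refl _
    omega

lemma pvUpd_max : ∀ (L : List (Nat × Nat × Nat)) (st x : Nat × Nat × Nat), x ∈ L →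
    x.2.2 ≤ (L.foldl pvUpd st).2.2 := by
  intro L
  induction L with
  | nil => intro st x hx; simp at hx
  | cons y tl ih =>
    intro st x hx
    simp only [List.foldl_cons]
    rcases List.mem_cons.mp hx with h | h
    · subst h
      have h1 : x.2.2 ≤ (pvUpd st x).2.2 := by
        unfold pvUpd; split_ifs with h
        · simp only; omega
        · omega
      have := pvUpd_mono tl (pvUpd st x)
      omega
    · exact ih (pvUpd st y) x h

lemma pvUpd_wit : ∀ (L : List (Nat × Nat × Nat)) (st : Nat × Nat × Nat),
    L.foldl pvUpd st = st ∨
    ∃ x ∈ L, 0 < x.2.2 ∧ L.foldl pvUpd st = (x.1 + 1 - x.2.2, x.2.1 + 1 - x.2.2, x.2.2) := by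
  intro L
  induction L with
  | nil => intro st; left; rfl
  | cons y tl ih =>
    intro st
    simp only [List.foldl_cons]
    rcases ih (pvUpd st y) with h | ⟨x, hx, hp, hh⟩
    · rw [h]
      simp only [pvUpd]
      split_ifs with hy
      · right; exact ⟨y, List.mem_cons_self, by omega, rfl⟩
      · left; rfl
    · right; exact ⟨x, List.mem_cons_of_mem _ hx, hp, hh⟩

lemma mem_pvAll (a b : List String) (alo ahi blo bhi : Nat) (x : Nat × Nat × Nat) :
    x ∈ pvAll a b alo ahi blo bhi ↔
      ∃ i j, alo ≤ i ∧ i < ahi ∧ blo ≤ j ∧ j < bhi ∧ x = (i, j, pvE a b alo blo i j) := by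
  simp only [pvAll, pvPairs, List.mem_flatMap, List.mem_map, List.mem_range'_1]
  constructor
  · rintro ⟨i, ⟨hi1, hi2⟩, j, ⟨hj1, hj2⟩, rfl⟩
    exact ⟨i, j, hi1, by omega, hj1, by omega, rfl⟩
  · rintro ⟨i, j, h1, h2, h3, h4, rfl⟩
    exact ⟨i, ⟨h1, by omega⟩, j, ⟨h3, by omega⟩, rfl⟩

lemma pvRef_max (a b : List String) (alo ahi blo bhi i j : Nat)
    (h1 : alo ≤ i) (h2 : i < ahi) (h3 : blo ≤ j) (h4 : j < bhi) :
    pvE a b alo blo i j ≤ (pvRef a b alo ahi blo bhi).2.2 :=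
  pvUpd_max _ _ (i, j, pvE a b alo blo i j)
    ((mem_pvAll a b alo ahi blo bhi _).mpr ⟨i, j, h1, h2, h3, h4, rfl⟩)

lemma pvRef_wit (a b : List String) (alo ahi blo bhi : Nat) :
    pvRef a b alo ahi blo bhi = (alo, blo, 0) ∨
    ∃ i j, alo ≤ i ∧ i < ahi ∧ blo ≤ j ∧ j < bhi ∧ 0 < pvE a b alo blo i j ∧
      pvRef a b alo ahi blo bhi =
        (i + 1 - pvE a b alo blo i j, j + 1 - pvE a b alo blo i j, pvE a b alo blo i j) := by
  rcases pvUpd_wit (pvAll a b alo ahi blo bhi) (alo, blo, 0) with h | ⟨x, hx, hp, hh⟩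
  · left; exact h
  · right
    obtain ⟨i, j, h1, h2, h3, h4, rfl⟩ := (mem_pvAll a b alo ahi blo bhi x).mp hx
    exact ⟨i, j, h1, h2, h3, h4, hp, hh⟩

-- ===== B's DP scan equals the reference scan =====

def pvRowVec (a b : List String) (alo blo : Nat) (i width : Nat) : List Nat :=
  (List.range width).map (fun t => pvE a b alo blo i (blo + t))

lemma pvRowB_spec (a b : List String) (alo blo i width : Nat) (prev : List Nat)
    (h : (i = alo ∧ prev = List.replicate width 0) ∨
         (alo < i ∧ prev = pvRowVec a b alo blo (i - 1) width)) :
    pvRowB a b i blo width prev = pvRowVec a b alo blo i width := by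
  unfold pvRowB pvRowVec
  apply List.map_congr_left
  intro t ht
  rw [List.mem_range] at ht
  rw [pvE]
  by_cases hm : a.getD i "" = b.getD (blo + t) ""
  · simp only [if_pos hm]
    rcases h with ⟨hi, hp⟩ | ⟨hlt, hp⟩
    · subst hp
      rw [dif_neg (by omega : ¬ (alo < i ∧ blo < blo + t))]
      by_cases h0 : 0 < t
      · rw [if_pos h0]
        have hz : (List.replicate width 0).getD (t - 1) 0 = 0 := by
          rw [List.getD_eq_getElem?_getD, List.getElem?_replicate]
          split_ifs <;> rfl
        rw [hz]
      · rw [if_neg h0]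
    · subst hp
      by_cases h0 : 0 < t
      · rw [if_pos h0, dif_pos (⟨hlt, by omega⟩ : alo < i ∧ blo < blo + t)]
        have hget : (pvRowVec a b alo blo (i - 1) width).getD (t - 1) 0 =
            pvE a b alo blo (i - 1) (blo + (t - 1)) := by
          unfold pvRowVec
          rw [List.getD_eq_getElem?_getD]
          simp [List.getElem?_map, List.getElem?_range (by omega : t - 1 < width)]
        rw [hget]
        have he : blo + (t - 1) = blo + t - 1 := by omega
        rw [he]
      · rw [if_neg h0, dif_neg (by omega : ¬ (alo < i ∧ blo < blo + t))]
  · simp only [if_neg hm]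

lemma pvRowVec_length (a b : List String) (alo blo i width : Nat) :
    (pvRowVec a b alo blo i width).length = width := by simp [pvRowVec]

lemma pvScanB_spec (a b : List String) (alo blo bhi i : Nat) (best : Nat × Nat × Nat) :
    pvScanB i blo (pvRowVec a b alo blo i (bhi - blo)) best =
      (pvPairs a b alo blo bhi i).foldl pvUpd best := by
  unfold pvScanB pvPairs
  rw [pvRowVec_length]
  rw [List.range'_eq_map_range, List.map_map, List.foldl_map]
  apply List.foldl_ext
  intro st t ht
  rw [List.mem_range] at ht
  have hg : (pvRowVec a b alo blo i (bhi - blo)).getD t 0 = pvE a b alo blo i (blo + t) := by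
    unfold pvRowVec
    rw [List.getD_eq_getElem?_getD]
    simp [List.getElem?_map, List.getElem?_range ht]
  rw [hg]
  simp only [pvUpd, Function.comp]

lemma pvBestB_spec (a b : List String) (alo blo bhi : Nat) : ∀ n,
    ((List.range' alo n).foldl
      (fun (st : List Nat × Nat × Nat × Nat) i =>
        let run := pvRowB a b i blo (bhi - blo) st.1
        (run, pvScanB i blo run st.2))
      (List.replicate (bhi - blo) 0, alo, blo, 0)) =
    ((if n = 0 then List.replicate (bhi - blo) 0 else pvRowVec a b alo blo (alo + n - 1) (bhi - blo)),
      ((List.range' alo n).flatMap (pvPairs a b alo blo bhi)).foldl pvUpd (alo, blo, 0)) := by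
  intro n
  induction n with
  | zero => simp
  | succ n ih =>
    rw [List.range'_1_concat, List.foldl_append, ih, List.foldl_cons, List.foldl_nil]
    dsimp only
    have hrow : pvRowB a b (alo + n) blo (bhi - blo)
        (if n = 0 then List.replicate (bhi - blo) 0 else pvRowVec a b alo blo (alo + n - 1) (bhi - blo)) =
        pvRowVec a b alo blo (alo + n) (bhi - blo) := by
      by_cases hn : n = 0
      · subst hn
        exact pvRowB_spec _ _ _ _ _ _ _ (Or.inl ⟨by omega, by simp⟩)
      · exact pvRowB_spec _ _ _ _ _ _ _
          (Or.inr ⟨by omega, by rw [if_neg hn]⟩)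
    rw [hrow, pvScanB_spec]
    have h1 : (if n + 1 = 0 then List.replicate (bhi - blo) 0
        else pvRowVec a b alo blo (alo + (n + 1) - 1) (bhi - blo)) =
        pvRowVec a b alo blo (alo + n) (bhi - blo) := by
      rw [if_neg (Nat.succ_ne_zero n), show alo + (n + 1) - 1 = alo + n by omega]
    rw [h1, List.flatMap_append, List.foldl_append]
    simp

lemma pvBestB_eq_ref (a b : List String) (alo ahi blo bhi : Nat) :
    pvBestB a b alo ahi blo bhi = pvRef a b alo ahi blo bhi := by
  unfold pvBestB pvRef pvAll
  dsimp only
  rw [pvBestB_spec]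

-- ===== difflib's dictionary scan equals the reference scan =====

def pvRowD (a b : List String) (alo blo bhi i : Nat) : List (Nat × Nat) :=
  (pvJs b (a.getD i "") blo bhi).map (fun j => (j, pvE a b alo blo i j))

lemma mem_pvJs (b : List String) (x : String) (blo bhi j : Nat) :
    j ∈ pvJs b x blo bhi ↔ j < b.length ∧ blo ≤ j ∧ j < bhi ∧ b.getD j "" = x := by
  simp [pvJs, List.mem_filter, List.mem_range, and_assoc]

lemma pvLookup_map {α : Type} (f : Nat → α) : ∀ (l : List Nat) (m : Nat),
    List.lookup m (l.map (fun j => (j, f j))) = if m ∈ l then some (f m) else none := by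
  intro l
  induction l with
  | nil => intro m; simp
  | cons j tl ih =>
    intro m
    simp only [List.map_cons, List.lookup_cons]
    by_cases h : m = j
    · subst h; simp
    · have hb : (m == j) = false := by simp [h]
      rw [hb]
      simp only [ih]
      simp [List.mem_cons, h]

-- the k computed by difflib's inner loop is exactly pvE
lemma pvK_eq (a b : List String) (alo blo bhi i j : Nat)
    (hb : bhi ≤ b.length)
    (hj : blo ≤ j) (hj2 : j < bhi) (hm : b.getD j "" = a.getD i "")
    (j2len : List (Nat × Nat))
    (hinv : j2len = if alo < i then pvRowD a b alo blo bhi (i - 1) else []) :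
    (if j = 0 then 0 else (List.lookup (j - 1) j2len).getD 0) + 1 = pvE a b alo blo i j := by
  rw [pvE]
  rw [if_pos hm.symm]
  congr 1
  by_cases hj0 : j = 0
  · subst hj0
    rw [if_pos rfl, dif_neg (by omega)]
  · rw [if_neg hj0]
    by_cases hi : alo < i
    · rw [hinv, if_pos hi]
      unfold pvRowD
      rw [pvLookup_map]
      by_cases hjm : j - 1 ∈ pvJs b (a.getD (i - 1) "") blo bhi
      · rw [if_pos hjm]
        rw [mem_pvJs] at hjm
        by_cases hbj : blo < j
        · rw [dif_pos ⟨hi, hbj⟩]; rfl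
        · exfalso; omega
      · rw [if_neg hjm]
        rw [mem_pvJs] at hjm
        push_neg at hjm
        by_cases hbj : blo < j
        · rw [dif_pos ⟨hi, hbj⟩]
          have hnm : ¬ a.getD (i - 1) "" = b.getD (j - 1) "" := by
            intro he
            exact absurd he.symm (hjm (by omega) (by omega) (by omega))
          rw [pvE_no_match a b alo blo _ _ hnm]
          rfl
        · rw [dif_neg (by omega)]; rfl
    · rw [hinv, if_neg hi, dif_neg (by omega)]
      simp

-- difflib's inner fold: best via pvUpd over the row's matched pairs, row dict rebuilt
lemma pvInner_spec (a b : List String) (alo blo bhi i : Nat)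
    (hb : bhi ≤ b.length)
    (j2len : List (Nat × Nat))
    (hinv : j2len = if alo < i then pvRowD a b alo blo bhi (i - 1) else []) :
    ∀ (js : List Nat) (best : Nat × Nat × Nat) (acc : List (Nat × Nat)),
    (∀ j ∈ js, blo ≤ j ∧ j < bhi ∧ b.getD j "" = a.getD i "") →
    js.foldl
      (fun (p : (Nat × Nat × Nat) × List (Nat × Nat)) j =>
        let k := (if j = 0 then 0 else (List.lookup (j - 1) j2len).getD 0) + 1
        ((if k > p.1.2.2 then (i + 1 - k, j + 1 - k, k) else p.1), p.2 ++ [(j, k)]))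
      (best, acc) =
    (js.foldl (fun bst j => pvUpd bst (i, j, pvE a b alo blo i j)) best,
      acc ++ js.map (fun j => (j, pvE a b alo blo i j))) := by
  intro js
  induction js with
  | nil => intro best acc _; simp
  | cons j tl ih =>
    intro best acc hjs
    obtain ⟨h1, h2, h3⟩ := hjs j List.mem_cons_self
    have hk := pvK_eq a b alo blo bhi i j hb h1 h2 h3 j2len hinv
    simp only [List.foldl_cons, hk]
    rw [ih _ _ (fun x hx => hjs x (List.mem_cons_of_mem _ hx))]
    simp [pvUpd, List.append_assoc]

-- dropping the unmatched (k = 0) pairs of a row does not change the best fold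
lemma pvSkip (a b : List String) (alo blo i : Nat) :
    ∀ (l : List Nat) (best : Nat × Nat × Nat),
    (l.filter (fun j => b.getD j "" == a.getD i "")).foldl
        (fun bst j => pvUpd bst (i, j, pvE a b alo blo i j)) best =
      l.foldl (fun bst j => pvUpd bst (i, j, pvE a b alo blo i j)) best := by
  intro l
  induction l with
  | nil => intro best; simp
  | cons j tl ih =>
    intro best
    by_cases hm : b.getD j "" = a.getD i ""
    · rw [List.filter_cons_of_pos (by simpa using hm)]
      simp only [List.foldl_cons]
      exact ih _
    · rw [List.filter_cons_of_neg (by simpa using hm)]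
      simp only [List.foldl_cons]
      have h0 : pvE a b alo blo i j = 0 := pvE_no_match a b alo blo i j (fun h => hm h.symm)
      have hid : pvUpd best (i, j, pvE a b alo blo i j) = best := by
        simp [pvUpd, h0]
      rw [hid]
      exact ih best

lemma pvJs_eq (b : List String) (x : String) (blo bhi : Nat)
    (h1 : blo ≤ bhi) (h2 : bhi ≤ b.length) :
    pvJs b x blo bhi = (List.range' blo (bhi - blo)).filter (fun j => b.getD j "" == x) := by
  unfold pvJs
  have e1 := List.range'_append (s := 0) (m := blo) (n := bhi - blo) (step := 1)
  rw [show 0 + 1 * blo = blo by omega, show blo + (bhi - blo) = bhi by omega] at e1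
  have e2 := List.range'_append (s := 0) (m := bhi) (n := b.length - bhi) (step := 1)
  rw [show 0 + 1 * bhi = bhi by omega, show bhi + (b.length - bhi) = b.length by omega] at e2
  rw [List.range_eq_range', ← e2, ← e1]
  rw [List.filter_append, List.filter_append]
  have hl : (List.range' 0 blo).filter
      (fun j => decide (blo ≤ j) && decide (j < bhi) && (b.getD j "" == x)) = [] := by
    apply List.filter_eq_nil_iff.mpr
    intro j hj
    rw [List.mem_range'_1] at hj
    simp only [Bool.and_eq_true, decide_eq_true_eq]
    omega
  have hr : (List.range' bhi (b.length - bhi)).filter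
      (fun j => decide (blo ≤ j) && decide (j < bhi) && (b.getD j "" == x)) = [] := by
    apply List.filter_eq_nil_iff.mpr
    intro j hj
    rw [List.mem_range'_1] at hj
    simp only [Bool.and_eq_true, decide_eq_true_eq]
    omega
  have hm : (List.range' blo (bhi - blo)).filter
      (fun j => decide (blo ≤ j) && decide (j < bhi) && (b.getD j "" == x)) =
      (List.range' blo (bhi - blo)).filter (fun j => b.getD j "" == x) := by
    apply List.filter_congr
    intro j hj
    rw [List.mem_range'_1] at hj
    have c1 : blo ≤ j := hj.1
    have c2 : j < bhi := by omega
    simp [c1, c2]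
  rw [hl, hr, hm]
  simp

-- one matched row's fold equals the full row's fold (unmatched pairs never update)
lemma pvPairsD_fold (a b : List String) (alo blo bhi i : Nat)
    (h1 : blo ≤ bhi) (h2 : bhi ≤ b.length) (s : Nat × Nat × Nat) :
    ((pvJs b (a.getD i "") blo bhi).map (fun j => (i, j, pvE a b alo blo i j))).foldl pvUpd s =
      (pvPairs a b alo blo bhi i).foldl pvUpd s := by
  rw [List.foldl_map, pvJs_eq b _ blo bhi h1 h2, pvSkip]
  unfold pvPairs
  rw [List.foldl_map]

lemma pvFlatEquiv (a b : List String) (alo blo bhi : Nat)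
    (h1 : blo ≤ bhi) (h2 : bhi ≤ b.length) :
    ∀ (rows : List Nat) (s : Nat × Nat × Nat),
    (rows.flatMap (fun i => (pvJs b (a.getD i "") blo bhi).map
        (fun j => (i, j, pvE a b alo blo i j)))).foldl pvUpd s =
      (rows.flatMap (pvPairs a b alo blo bhi)).foldl pvUpd s := by
  intro rows
  induction rows with
  | nil => intro s; rfl
  | cons i tl ih =>
    intro s
    rw [List.flatMap_cons, List.flatMap_cons, List.foldl_append, List.foldl_append,
      pvPairsD_fold a b alo blo bhi i h1 h2, ih]

-- difflib's row fold (best and dictionary together) over the first n rows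
lemma pvFLMdict_spec (a b : List String) (alo blo bhi : Nat)
    (h2 : bhi ≤ b.length) : ∀ n,
    ((List.range' alo n).foldl
      (fun (st : (Nat × Nat × Nat) × List (Nat × Nat)) i =>
        let j2len := st.2
        (pvJs b (a.getD i "") blo bhi).foldl
          (fun (p : (Nat × Nat × Nat) × List (Nat × Nat)) j =>
            let k := (if j = 0 then 0 else (List.lookup (j - 1) j2len).getD 0) + 1
            ((if k > p.1.2.2 then (i + 1 - k, j + 1 - k, k) else p.1), p.2 ++ [(j, k)]))
          (st.1, ([] : List (Nat × Nat))))
      ((alo, blo, 0), ([] : List (Nat × Nat)))) =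
    (((List.range' alo n).flatMap (fun i => (pvJs b (a.getD i "") blo bhi).map
        (fun j => (i, j, pvE a b alo blo i j)))).foldl pvUpd (alo, blo, 0),
      if n = 0 then [] else pvRowD a b alo blo bhi (alo + n - 1)) := by
  intro n
  induction n with
  | zero => simp
  | succ n ih =>
    rw [List.range'_1_concat, List.foldl_append, ih, List.foldl_cons, List.foldl_nil]
    dsimp only
    rw [pvInner_spec a b alo blo bhi (alo + n) h2 _ ?hinv _ _ _ ?hjs]
    case hinv =>
      by_cases hn : n = 0
      · subst hn
        rw [if_pos rfl, if_neg (by omega : ¬ alo < alo + 0)]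
      · rw [if_neg hn, if_pos (by omega : alo < alo + n)]
    case hjs =>
      intro j hj
      rw [mem_pvJs] at hj
      exact ⟨hj.2.1, hj.2.2.1, hj.2.2.2⟩
    refine Prod.ext ?_ ?_
    · rw [List.flatMap_append, List.foldl_append]
      simp only [List.flatMap_cons, List.flatMap_nil, List.append_nil]
      rw [List.foldl_map]
    · rw [if_neg (Nat.succ_ne_zero n)]
      unfold pvRowD
      simp only [List.nil_append]
      rfl

lemma pvFLMdict_eq_ref (a b : List String) (alo ahi blo bhi : Nat)
    (h1 : blo ≤ bhi) (h2 : bhi ≤ b.length) :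
    pvFLMdict a b alo ahi blo bhi = pvRef a b alo ahi blo bhi := by
  unfold pvFLMdict
  rw [pvFLMdict_spec a b alo blo bhi h2]
  unfold pvRef pvAll
  exact pvFlatEquiv a b alo blo bhi h1 h2 _ _

-- the two extension loops of find_longest_match never fire
lemma pvExt_noop (a b : List String) (alo ahi blo bhi : Nat)
    (h1 : blo ≤ bhi) (h2 : bhi ≤ b.length) :
    pvFLM a b alo ahi blo bhi = pvBestB a b alo ahi blo bhi := by
  unfold pvFLM
  rw [pvFLMdict_eq_ref a b alo ahi blo bhi h1 h2, pvBestB_eq_ref]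
  rcases pvRef_wit a b alo ahi blo bhi with hw | ⟨i, j, hi1, hi2, hj1, hj2, hp, hw⟩
  · rw [hw]
    dsimp only
    rw [pvExtL, dif_neg (by omega : ¬ (alo < alo ∧ blo < blo ∧
      a.getD (alo - 1) "" = b.getD (blo - 1) ""))]
    dsimp only
    rw [pvExtR]
    rw [dif_neg ?hg]
    case hg =>
      rintro ⟨hg1, hg2, hg3⟩
      have hpos : 0 < pvE a b alo blo alo blo := by
        rw [pvE, if_pos (by simpa using hg3)]
        omega
      have := pvRef_max a b alo ahi blo bhi alo blo (le_refl _) (by omega) (le_refl _) (by omega)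
      rw [hw] at this
      simp only at this
      omega
  · rw [hw]
    dsimp only
    have hle := pvE_le a b alo blo i j hi1 hj1
    set E := pvE a b alo blo i j with hE
    have hextl : pvExtL a b alo blo (i + 1 - E) (j + 1 - E) E = (i + 1 - E, j + 1 - E, E) := by
      rw [pvExtL]
      rw [dif_neg ?hg]
      case hg =>
        rintro ⟨hg1, hg2, hg3⟩
        refine pvE_stop a b alo blo E i j hE.symm (by omega) (by omega) (by omega) (by omega) ?_
        have e1 : i + 1 - E - 1 = i - E := by omega
        have e2 : j + 1 - E - 1 = j - E := by omega
        rw [e1, e2] at hg3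
        exact hg3
    rw [hextl]
    dsimp only
    rw [pvExtR]
    rw [dif_neg ?hg2]
    case hg2 =>
      rintro ⟨hg1, hg2, hg3⟩
      have e1 : i + 1 - E + E = i + 1 := by omega
      have e2 : j + 1 - E + E = j + 1 := by omega
      rw [e1] at hg1 hg3
      rw [e2] at hg2 hg3
      have hnext : pvE a b alo blo (i + 1) (j + 1) = E + 1 := by
        rw [pvE, if_pos hg3, dif_pos (by omega : alo < i + 1 ∧ blo < j + 1)]
        simp only [Nat.add_sub_cancel]
        rw [← hE]
      have := pvRef_max a b alo ahi blo bhi (i + 1) (j + 1) (by omega) hg1 (by omega) hg2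
      rw [hw, hnext] at this
      simp only at this
      omega

-- when it finds a block, the reference scan's block lies inside the region
lemma pvBestB_bounds (a b : List String) (alo ahi blo bhi : Nat)
    (h : (pvBestB a b alo ahi blo bhi).2.2 ≠ 0) :
    alo ≤ (pvBestB a b alo ahi blo bhi).1 ∧
    (pvBestB a b alo ahi blo bhi).1 + (pvBestB a b alo ahi blo bhi).2.2 ≤ ahi ∧
    blo ≤ (pvBestB a b alo ahi blo bhi).2.1 ∧
    (pvBestB a b alo ahi blo bhi).2.1 + (pvBestB a b alo ahi blo bhi).2.2 ≤ bhi := by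
  rw [pvBestB_eq_ref] at h ⊢
  rcases pvRef_wit a b alo ahi blo bhi with hh | ⟨i, j, hi1, hi2, hj1, hj2, hp, hh⟩
  · rw [hh] at h; simp at h
  · have hle := pvE_le a b alo blo i j hi1 hj1
    rw [hh] at h ⊢
    simp only at h ⊢
    omega

-- ===== the walk is the block fold =====

-- the per-block step of the bridge fold (gap rule then matched run)
def pvBStep (limit : Nat) (st : List (Option Nat) × Nat × Nat) (blk : Nat × Nat × Nat) :
    List (Option Nat) × Nat × Nat :=
  (pvGapTo limit st blk.1 blk.2.1 ++
      (List.range' blk.1 (min (blk.1 + blk.2.2) limit - blk.1)).map some,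
    blk.1 + blk.2.2, blk.2.1 + blk.2.2)

lemma pvWalk_eq_fold (a b : List String) (limit : Nat) : ∀ (fuel : Nat)
    (st : List (Option Nat) × Nat × Nat) (alo ahi blo bhi : Nat),
    blo ≤ bhi → bhi ≤ b.length →
    pvWalk a b limit fuel st alo ahi blo bhi =
      (pvMBrec a b fuel alo ahi blo bhi).foldl (pvBStep limit) st := by
  intro fuel
  induction fuel with
  | zero => intro st alo ahi blo bhi _ _; simp [pvWalk, pvMBrec]
  | succ fuel ih =>
    intro st alo ahi blo bhi hb1 hb2
    rw [pvWalk, pvMBrec]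
    rw [← pvExt_noop a b alo ahi blo bhi hb1 hb2]
    by_cases hk : (pvFLM a b alo ahi blo bhi).2.2 = 0
    · simp [hk]
    · rw [if_neg hk, if_neg hk]
      have hbd := pvBestB_bounds a b alo ahi blo bhi
        (by rw [← pvExt_noop a b alo ahi blo bhi hb1 hb2]; exact hk)
      rw [← pvExt_noop a b alo ahi blo bhi hb1 hb2] at hbd
      rw [List.foldl_append, List.foldl_cons]
      rw [← ih st alo (pvFLM a b alo ahi blo bhi).1 blo (pvFLM a b alo ahi blo bhi).2.1
        (by omega) (by omega)]
      rw [← ih _ _ ahi _ bhi (by omega) (by omega)]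
      rfl

-- zero-length blocks and merging adjacent blocks are invisible to the block fold
lemma pvRange'_merge (i n1 n2 limit : Nat) :
    List.range' i (min (i + n1) limit - i) ++
      List.range' (i + n1) (min (i + n1 + n2) limit - (i + n1)) =
      List.range' i (min (i + (n1 + n2)) limit - i) := by
  by_cases hl : limit ≤ i + n1
  · have c2 : min (i + n1 + n2) limit - (i + n1) = 0 := by omega
    rw [c2, List.range'_zero, List.append_nil]
    congr 1
    omega
  · have hc1 : min (i + n1) limit - i = n1 := by omega
    rw [hc1]
    have h := List.range'_append (s := i) (m := n1)
      (n := min (i + n1 + n2) limit - (i + n1)) (step := 1)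
    rw [Nat.one_mul] at h
    rw [h]
    congr 1
    omega

lemma pvMerge2 (limit : Nat) (st : List (Option Nat) × Nat × Nat) (i j n1 n2 : Nat) :
    pvBStep limit (pvBStep limit st (i, j, n1)) (i + n1, j + n1, n2) =
      pvBStep limit st (i, j, n1 + n2) := by
  simp only [pvBStep, pvGapTo, Nat.sub_self, Nat.min_zero, List.range'_zero,
    List.map_nil, List.replicate_zero, List.append_nil]
  refine Prod.ext ?_ (Prod.ext (by simp only; omega) (by simp only; omega))
  simp only
  rw [← pvRange'_merge i n1 n2 limit, List.map_append]
  simp [List.append_assoc]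

lemma pvMBrec_pos (a b : List String) : ∀ (fuel alo ahi blo bhi : Nat)
    (x : Nat × Nat × Nat), x ∈ pvMBrec a b fuel alo ahi blo bhi → 0 < x.2.2 := by
  intro fuel
  induction fuel with
  | zero => intro alo ahi blo bhi x hx; simp [pvMBrec] at hx
  | succ fuel ih =>
    intro alo ahi blo bhi x hx
    rw [pvMBrec] at hx
    split_ifs at hx with h0
    · simp at hx
    · rcases List.mem_append.mp hx with h | h
      · exact ih _ _ _ _ x h
      · rcases List.mem_cons.mp h with h | h
        · rcases h with rfl; exact Nat.pos_of_ne_zero h0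
        · exact ih _ _ _ _ x h

lemma pvMergeFold (limit : Nat) : ∀ (mb : List (Nat × Nat × Nat))
    (acc : List (Nat × Nat × Nat)) (p : Nat × Nat × Nat),
    (∀ x ∈ mb, 0 < x.2.2) →
    (0 < p.2.2 ∨ (p = (0, 0, 0) ∧ acc = [])) →
    ∀ (s : List (Option Nat) × Nat × Nat),
    List.foldl (pvBStep limit) s
      (if (mb.foldl
          (fun (st : List (Nat × Nat × Nat) × Nat × Nat × Nat) blk =>
            if st.2.1 + st.2.2.2 = blk.1 ∧ st.2.2.1 + st.2.2.2 = blk.2.1 then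
              (st.1, st.2.1, st.2.2.1, st.2.2.2 + blk.2.2)
            else ((if st.2.2.2 ≠ 0 then st.1 ++ [st.2] else st.1), blk))
          (acc, p)).2.2.2 ≠ 0 then
        (mb.foldl
          (fun (st : List (Nat × Nat × Nat) × Nat × Nat × Nat) blk =>
            if st.2.1 + st.2.2.2 = blk.1 ∧ st.2.2.1 + st.2.2.2 = blk.2.1 then
              (st.1, st.2.1, st.2.2.1, st.2.2.2 + blk.2.2)
            else ((if st.2.2.2 ≠ 0 then st.1 ++ [st.2] else st.1), blk))
          (acc, p)).1 ++ [(mb.foldl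
          (fun (st : List (Nat × Nat × Nat) × Nat × Nat × Nat) blk =>
            if st.2.1 + st.2.2.2 = blk.1 ∧ st.2.2.1 + st.2.2.2 = blk.2.1 then
              (st.1, st.2.1, st.2.2.1, st.2.2.2 + blk.2.2)
            else ((if st.2.2.2 ≠ 0 then st.1 ++ [st.2] else st.1), blk))
          (acc, p)).2]
       else (mb.foldl
          (fun (st : List (Nat × Nat × Nat) × Nat × Nat × Nat) blk =>
            if st.2.1 + st.2.2.2 = blk.1 ∧ st.2.2.1 + st.2.2.2 = blk.2.1 then
              (st.1, st.2.1, st.2.2.1, st.2.2.2 + blk.2.2)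
            else ((if st.2.2.2 ≠ 0 then st.1 ++ [st.2] else st.1), blk))
          (acc, p)).1) =
    List.foldl (pvBStep limit) s ((if p.2.2 ≠ 0 then acc ++ [p] else acc) ++ mb) := by
  intro mb
  induction mb with
  | nil =>
    intro acc p hpos hinv s
    simp
  | cons blk tl ih =>
    intro acc p hpos hinv s
    have hblk : 0 < blk.2.2 := hpos blk List.mem_cons_self
    simp only [List.foldl_cons]
    by_cases hc : p.1 + p.2.2 = blk.1 ∧ p.2.1 + p.2.2 = blk.2.1
    · rw [if_pos (show (acc, p).2.1 + (acc, p).2.2.2 = blk.1 ∧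
          (acc, p).2.2.1 + (acc, p).2.2.2 = blk.2.1 from hc)]
      rw [ih acc (p.1, p.2.1, p.2.2 + blk.2.2)
        (fun x hx => hpos x (List.mem_cons_of_mem _ hx)) (Or.inl (by dsimp only; omega)) s]
      rcases hinv with hp | ⟨hp, ha⟩
      · rw [if_pos (show p.2.2 ≠ 0 by omega),
          if_pos (show (p.1, p.2.1, p.2.2 + blk.2.2).2.2 ≠ 0 by dsimp only; omega)]
        have hb : blk = (p.1 + p.2.2, p.2.1 + p.2.2, blk.2.2) := by
          obtain ⟨hc1, hc2⟩ := hc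
          refine Prod.ext ?_ (Prod.ext ?_ rfl)
          · show blk.1 = p.1 + p.2.2
            omega
          · show blk.2.1 = p.2.1 + p.2.2
            omega
        simp only [List.append_assoc, List.singleton_append, List.foldl_append,
          List.foldl_cons]
        have key : pvBStep limit (List.foldl (pvBStep limit) s acc) (p.1, p.2.1, p.2.2 + blk.2.2)
            = pvBStep limit (pvBStep limit (List.foldl (pvBStep limit) s acc) p) blk := by
          rw [hb]
          exact (pvMerge2 limit _ p.1 p.2.1 p.2.2 blk.2.2).symm
        rw [key]
      · subst ha
        rw [hp]
        rw [if_neg (show ¬ (((0 : Nat), (0 : Nat), (0 : Nat)) : Nat × Nat × Nat).2.2 ≠ 0 by simp),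
          if_pos (show (((0 : Nat) , (0 : Nat), (0 : Nat) + blk.2.2) : Nat × Nat × Nat).2.2 ≠ 0
            by dsimp only; omega)]
        have hb : blk = ((0 : Nat), (0 : Nat), blk.2.2) := by
          rw [hp] at hc
          obtain ⟨hc1, hc2⟩ := hc
          refine Prod.ext ?_ (Prod.ext ?_ rfl)
          · show blk.1 = 0
            dsimp only at hc1
            omega
          · show blk.2.1 = 0
            dsimp only at hc2
            omega
        simp only [List.nil_append, List.singleton_append, List.foldl_cons]
        congr 2
        rw [hb]
        simp
    · rw [if_neg (show ¬ ((acc, p).2.1 + (acc, p).2.2.2 = blk.1 ∧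
          (acc, p).2.2.1 + (acc, p).2.2.2 = blk.2.1) from hc)]
      rw [ih _ blk (fun x hx => hpos x (List.mem_cons_of_mem _ hx)) (Or.inl hblk) s]
      rw [if_pos (show blk.2.2 ≠ 0 by omega)]
      congr 1
      simp [List.append_assoc]

lemma pvBlocks_fold (a b : List String) (limit : Nat) :
    (pvBlocks a b).foldl (pvBStep limit) ([], 0, 0) =
      ((pvMBrec a b (a.length + b.length + 1) 0 a.length 0 b.length) ++
        [(a.length, b.length, 0)]).foldl (pvBStep limit) ([], 0, 0) := by
  unfold pvBlocks
  rw [List.foldl_append, List.foldl_append]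
  congr 1
  have h := pvMergeFold limit (pvMBrec a b (a.length + b.length + 1) 0 a.length 0 b.length)
    [] (0, 0, 0) (fun x hx => pvMBrec_pos a b _ _ _ _ _ x hx)
    (Or.inr ⟨rfl, rfl⟩) ([], 0, 0)
  rw [if_neg (show ¬ (((0 : Nat), (0 : Nat), (0 : Nat)) : Nat × Nat × Nat).2.2 ≠ 0 by simp),
    List.nil_append] at h
  exact h

-- ===== A's opcode fold equals the block fold (per-block) =====

-- pvMat after some is just the clamped state lookup
lemma pvComp (states : List Bool) :
    (pvMat states ∘ some) = fun k => states.getD k false := funext fun _ => rfl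

-- an in-range index range materializes to the corresponding slice of the states
lemma pvRangeMat (l : List Bool) : ∀ (k a : Nat), a + k ≤ l.length →
    (List.range' a k).map (fun i => l.getD i false) = (l.drop a).take k := by
  intro k
  induction k with
  | zero => intro a _; simp
  | succ k ih =>
    intro a ha
    have hlt : a < l.length := by omega
    rw [List.range'_succ, List.map_cons, ih (a + 1) (by omega),
        List.drop_eq_getElem_cons hlt, List.take_succ_cons]
    simp [List.getD_eq_getElem?_getD, List.getElem?_eq_getElem hlt]

-- taking the same effective prefix
lemma pvTakeEq (l : List Bool) (m n : Nat) (h : min m l.length = min n l.length) :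
    l.take m = l.take n := by
  apply List.ext_getElem
  · simp [h]
  · intro i h1 h2; simp

-- the opcode accumulator only grows on the right; positions ignore it
lemma pvOpStep_fst (st : List (String × Nat × Nat × Nat × Nat) × Nat × Nat) (blk : Nat × Nat × Nat) :
    (pvOpStep st blk).1 = st.1 ++ (pvOpStep ([], st.2) blk).1 := by
  simp only [pvOpStep]
  split_ifs <;> simp

lemma pvOpStep_snd (st : List (String × Nat × Nat × Nat × Nat) × Nat × Nat) (blk : Nat × Nat × Nat) :
    (pvOpStep st blk).2 = (blk.1 + blk.2.2, blk.2.1 + blk.2.2) := rfl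

lemma pvOpFold_fst : ∀ (bl : List (Nat × Nat × Nat)) (st : List (String × Nat × Nat × Nat × Nat) × Nat × Nat),
    (bl.foldl pvOpStep st).1 = st.1 ++ (bl.foldl pvOpStep ([], st.2)).1 ∧
    (bl.foldl pvOpStep st).2 = (bl.foldl pvOpStep ([], st.2)).2 := by
  intro bl
  induction bl with
  | nil => intro st; simp
  | cons blk tl ih =>
    intro st
    simp only [List.foldl_cons]
    have key : pvOpStep st blk =
        (st.1 ++ (pvOpStep ([], st.2) blk).1, (pvOpStep ([], st.2) blk).2) :=
      Prod.ext (pvOpStep_fst st blk) (by rw [pvOpStep_snd, pvOpStep_snd])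
    rw [key]
    obtain ⟨f1, s1⟩ := ih (st.1 ++ (pvOpStep ([], st.2) blk).1, (pvOpStep ([], st.2) blk).2)
    obtain ⟨f2, s2⟩ := ih (pvOpStep ([], st.2) blk)
    constructor
    · simp only at f1
      rw [f1, f2, List.append_assoc]
    · simp only at s1
      rw [s1, s2]

-- the gap slice of B's index map materializes to A's carried chunk prefix
lemma pvGapCarry (states : List Bool) (i ai gap : Nat) :
    (List.range' i (min (min ai states.length - i) gap)).map
        (fun k => states.getD k false) =
      ((states.drop i).take (ai - i)).take
        (min ((states.drop i).take (ai - i)).length gap) := by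
  set L := states.length with hL
  set c := min (min ai L - i) gap with hc
  have hlen : ((states.drop i).take (ai - i)).length = min (ai - i) (L - i) := by
    simp [hL]
  rw [List.take_take, hlen]
  have hcc : min (min (ai - i) (L - i)) gap = c := by omega
  rw [hcc]
  by_cases hiL : L ≤ i
  · have hc0 : c = 0 := by omega
    have : states.drop i = [] := List.drop_eq_nil_of_le (by omega)
    simp [hc0, this]
  · have h1 : i + c ≤ L := by omega
    rw [pvRangeMat states c i h1]
    apply pvTakeEq
    have h2 : (states.drop i).length = L - i := by simp [hL]
    omega

-- the matched-run slice of B's index map materializes to A's equal chunk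
lemma pvRunMat (states : List Bool) (ai n : Nat) :
    (List.range' ai (min (ai + n) states.length - ai)).map
        (fun k => states.getD k false) = (states.drop ai).take n := by
  set L := states.length with hL
  by_cases hiL : L ≤ ai
  · have : states.drop ai = [] := List.drop_eq_nil_of_le (by omega)
    have h0 : min (ai + n) L - ai = 0 := by omega
    simp [h0, this]
  · have h1 : ai + (min (ai + n) L - ai) ≤ L := by omega
    rw [pvRangeMat states _ ai h1]
    apply pvTakeEq
    have h2 : (states.drop ai).length = L - ai := by simp [hL]
    omega

-- A's handling of the (at most two) opcodes of one block equals the materialization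
-- of B's uniform gap-plus-run index-map step
lemma pvBlockStep (states : List Bool) (accB : List (Option Nat)) (i j : Nat) (blk : Nat × Nat × Nat) :
    List.foldl (pvAStep states) (accB.map (pvMat states)) (pvOpStep ([], i, j) blk).1 =
      ((pvBStep states.length (accB, i, j) blk).1).map (pvMat states) := by
  rcases blk with ⟨ai, bj, n⟩
  have hc : min (min ai states.length - i) (bj - j)
      = min ((states.drop i).take (ai - i)).length (bj - j) := by simp; omega
  have hgap2 := pvGapCarry states i ai (bj - j)
  rw [hc] at hgap2
  have hrun := pvRunMat states ai n
  simp only [pvBStep, pvGapTo, List.map_append, List.map_map, List.map_replicate, pvComp, pvMat,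
    hc, hgap2, hrun]
  by_cases h1 : i < ai ∧ j < bj
  · -- replace
    by_cases hn : n = 0
    · simp [pvOpStep, pvAStep, h1, hn, List.append_assoc]
      intros
      omega
    · simp [pvOpStep, pvAStep, h1, hn, List.append_assoc]
      intros
      omega
  · by_cases h2 : i < ai
    · -- delete: gap = 0, carry = 0
      have h3 : ¬ j < bj := fun hj => h1 ⟨h2, hj⟩
      have hbj : bj - j = 0 := by omega
      by_cases hn : n = 0 <;>
        simp [pvOpStep, pvAStep, h2, h3, hn, hbj]
    · -- insert or empty gap: no old lines in the gap, carry = 0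
      have h0 : ai - i = 0 := by omega
      by_cases h3 : j < bj
      · by_cases hn : n = 0 <;>
          simp [pvOpStep, pvAStep, h2, h3, hn, h0]
      · have hbj : bj - j = 0 := by omega
        by_cases hn : n = 0 <;>
          simp [pvOpStep, pvAStep, h2, h3, hn, h0, hbj]

lemma pvMain (states : List Bool) : ∀ (bl : List (Nat × Nat × Nat)) (i j : Nat) (accB : List (Option Nat)),
    List.foldl (pvAStep states) (accB.map (pvMat states)) (bl.foldl pvOpStep ([], i, j)).1 =
      ((bl.foldl (pvBStep states.length) (accB, i, j)).1).map (pvMat states) := by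
  intro bl
  induction bl with
  | nil => intro i j accB; simp
  | cons blk tl ih =>
    intro i j accB
    simp only [List.foldl_cons]
    obtain ⟨hf, hs⟩ := pvOpFold_fst tl (pvOpStep ([], i, j) blk)
    rw [hf, List.foldl_append, pvBlockStep states accB i j blk]
    have hb : pvBStep states.length (accB, i, j) blk =
        ((pvBStep states.length (accB, i, j) blk).1, blk.1 + blk.2.2, blk.2.1 + blk.2.2) := rfl
    rw [hb, ← ih (blk.1 + blk.2.2) (blk.2.1 + blk.2.2) ((pvBStep states.length (accB, i, j) blk).1)]
    have hsnd : (pvOpStep (([] : List (String × Nat × Nat × Nat × Nat)), i, j) blk).2 =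
        (blk.1 + blk.2.2, blk.2.1 + blk.2.2) := pvOpStep_snd _ _
    rw [hsnd]

-- ===== VERDICT (by name: the statement is the Claim_ definition above) =====
theorem remap_task_states_py_spec : Claim_equal_remap_task_states_py := by
  intro old_lines new_lines old_states _
  unfold Spec_remap_task_states_py remap_task_states_py remap_task_states_py_alt pvOpcodes
  have hA := pvMain old_states (pvBlocks old_lines new_lines) 0 0 []
  simp only [List.map_nil] at hA
  rw [hA, pvBlocks_fold, List.foldl_append, List.foldl_cons, List.foldl_nil]
  rw [← pvWalk_eq_fold old_lines new_lines old_states.length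
    (old_lines.length + new_lines.length + 1) ([], 0, 0)
    0 old_lines.length 0 new_lines.length (by omega) (le_refl _)]
  congr 1
  simp only [pvBStep]
  have h0 : min (old_lines.length + 0) old_states.length - old_lines.length = 0 := by omega
  rw [h0, List.range'_zero, List.map_nil, List.append_nil]
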